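-- pv_equiv track=rewrite | github.com/lucasadelino/Learning-Python | Automate the Boring Stuff Practice Projects/Chapter 5/chessboard.py | is_valid_chessboard
-- ===== SOURCE A (Python) =====
-- POSSIBLE_X = ['a', 'b', 'c', 'd', 'e', 'f', 'g', 'h']
--
-- POSSIBLE_Y = ['0', '1', '2', '3', '4', '5', '6', '7', '8']
--
-- POSSIBLE_PIECES = ['wpawn', 'wknight', 'wbishop', 'wrook', 'wqueen', 'wking',
--                     'bpawn', 'bknight', 'bbishop', 'brook', 'bqueen', 'bking']
--
-- MAX_PIECES = 16
--
-- MAX_PAWNS = 8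
--
-- def is_valid_chessboard(board):
--     for key in board:
--         if len(key) != 2:
--             return False
--         if key[0] not in POSSIBLE_X:
--             return False
--         if key[1] not in POSSIBLE_Y:
--             return False
--
--     wkings = bkings = wpawns = bpawns = wpieces = bpieces = 0
--     for value in board.values():
--         if value not in POSSIBLE_PIECES:
--             return False
--         if value == 'wking':
--             wkings += 1
--         if value == 'bking':
--             bkings += 1
--         if value == 'wpawn':
--             wpawns += 1
--         if value == 'bpawn':
--             bpawns += 1
--         if value.startswith('w'):
--             wpieces += 1
--         if value.startswith('b'):
--             bpieces += 1
--     if wkings != 1 or bkings != 1: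
--         return False
--     if wpawns > MAX_PAWNS or bpawns > MAX_PAWNS:
--         return False
--     if wpieces > MAX_PIECES or bpieces > MAX_PIECES:
--         return False
--
--     return True
-- ===== SOURCE B (Python) =====
-- POSSIBLE_X = ['a', 'b', 'c', 'd', 'e', 'f', 'g', 'h']
--
-- POSSIBLE_Y = ['0', '1', '2', '3', '4', '5', '6', '7', '8']
--
-- POSSIBLE_PIECES = ['wpawn', 'wknight', 'wbishop', 'wrook', 'wqueen', 'wking',
--                     'bpawn', 'bknight', 'bbishop', 'brook', 'bqueen', 'bking']
--
-- MAX_PIECES = 16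
--
-- MAX_PAWNS = 8
--
--
-- def is_valid_chessboard(board):
--     # Declarative staged checks instead of per-item loops with counters:
--     # keys are validated by inclusion in the precomputed set of all legal
--     # squares, values by set inclusion in the piece names, each bound by a
--     # separate count, and the black total as the complement of the white one.
--     squares = {x + y for x in POSSIBLE_X for y in POSSIBLE_Y}
--     if not set(board) <= squares:
--         return False
--     vals = list(board.values())
--     if not set(vals) <= set(POSSIBLE_PIECES):
--         return False
--     if vals.count('wking') != 1 or vals.count('bking') != 1:
--         return False
--     if vals.count('wpawn') > MAX_PAWNS or vals.count('bpawn') > MAX_PAWNS: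
--         return False
--     whites = sum(1 for v in vals if v[0] == 'w')
--     if whites > MAX_PIECES or len(vals) - whites > MAX_PIECES:
--         return False
--     return True
-- ===== Notes on version B (the rewrite author's own statement) =====
-- stated objective: simpler
-- what changed: Replaces A's two per-item loops with six running counters by declarative staged checks: keys validated by inclusion in a precomputed set of all 72 legal squares (no per-character tests), values by set inclusion in the piece names, each bound by a separate count() pass, and the black total derived as the complement of the white total.
import Mathlib
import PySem

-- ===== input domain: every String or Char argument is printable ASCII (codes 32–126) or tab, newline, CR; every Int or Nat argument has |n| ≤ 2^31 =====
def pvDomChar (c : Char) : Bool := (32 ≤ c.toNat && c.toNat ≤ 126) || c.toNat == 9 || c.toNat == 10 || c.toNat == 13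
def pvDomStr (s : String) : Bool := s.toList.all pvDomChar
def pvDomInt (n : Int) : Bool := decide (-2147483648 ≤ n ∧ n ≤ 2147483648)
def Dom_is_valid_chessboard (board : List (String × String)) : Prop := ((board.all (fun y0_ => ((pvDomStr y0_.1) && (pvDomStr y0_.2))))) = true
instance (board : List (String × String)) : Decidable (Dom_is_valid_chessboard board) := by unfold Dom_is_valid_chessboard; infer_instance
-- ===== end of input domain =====

-- B replaces A's two per-item loops with six running counters by declarative
-- staged checks: keys by inclusion in the precomputed set of all legal squares,
-- values by set inclusion in the piece names, each bound by a separate count,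
-- and the black total as the complement of the white total; objective: simpler.

-- ===== PORT A =====
def POSSIBLE_X : List Char := ['a', 'b', 'c', 'd', 'e', 'f', 'g', 'h']
def POSSIBLE_Y : List Char := ['0', '1', '2', '3', '4', '5', '6', '7', '8']
def POSSIBLE_PIECES : List String := ["wpawn", "wknight", "wbishop", "wrook", "wqueen", "wking",
                                     "bpawn", "bknight", "bbishop", "brook", "bqueen", "bking"]
def MAX_PIECES : Int := 16
def MAX_PAWNS : Int := 8

-- A's first loop: over the keys, in order
def chessA_keyloop : List String → Bool
  | [] => true
  | k :: rest =>
    if PySem.Str.len k ≠ 2 then false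
    else match PySem.Str.pyGet? k 0, PySem.Str.pyGet? k 1 with
      | some c0, some c1 =>
        if ¬ POSSIBLE_X.contains c0 then false
        else if ¬ POSSIBLE_Y.contains c1 then false
        else chessA_keyloop rest
      | _, _ => false   -- unreachable: len k = 2 was checked

-- A's second loop: over the values, carrying the six counters
def chessA_valloop : List String → Int → Int → Int → Int → Int → Int → Bool
  | [], wkings, bkings, wpawns, bpawns, wpieces, bpieces =>
      if wkings ≠ 1 ∨ bkings ≠ 1 then false
      else if wpawns > MAX_PAWNS ∨ bpawns > MAX_PAWNS then false
      else if wpieces > MAX_PIECES ∨ bpieces > MAX_PIECES then false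
      else true
  | v :: rest, wkings, bkings, wpawns, bpawns, wpieces, bpieces =>
      if ¬ POSSIBLE_PIECES.contains v then false
      else chessA_valloop rest
        (if v = "wking" then wkings + 1 else wkings)
        (if v = "bking" then bkings + 1 else bkings)
        (if v = "wpawn" then wpawns + 1 else wpawns)
        (if v = "bpawn" then bpawns + 1 else bpawns)
        (if PySem.Str.startswith v "w" then wpieces + 1 else wpieces)
        (if PySem.Str.startswith v "b" then bpieces + 1 else bpieces)

def is_valid_chessboard (board : List (String × String)) : Bool :=
  if chessA_keyloop (board.map Prod.fst) = false then false
  else chessA_valloop (board.map Prod.snd) 0 0 0 0 0 0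

-- ===== PORT B =====
-- Source B's module constants POSSIBLE_X / POSSIBLE_Y as B reads them: one-char strings
def chessB_X : List String := ["a", "b", "c", "d", "e", "f", "g", "h"]
def chessB_Y : List String := ["0", "1", "2", "3", "4", "5", "6", "7", "8"]

-- Python string concatenation x + y — exact: concatenation of the character lists
def chessB_cat (x y : String) : String := String.ofList (x.toList ++ y.toList)

-- squares = {x + y for x in POSSIBLE_X for y in POSSIBLE_Y}
def chessB_squares : PySem.Set String :=
  PySem.Set.ofList (chessB_X.flatMap (fun x => chessB_Y.map (fun y => chessB_cat x y)))

def is_valid_chessboard_alt (board : List (String × String)) : Bool :=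
  -- set(board) <= squares  (the keys of the dict)
  if ¬ PySem.Set.issubset (PySem.Set.ofList (board.map Prod.fst)) chessB_squares then false
  else
    let vals := board.map Prod.snd
    if ¬ PySem.Set.issubset (PySem.Set.ofList vals) (PySem.Set.ofList POSSIBLE_PIECES) then false
    else if (PySem.List.count vals "wking" : Int) ≠ 1 ∨ (PySem.List.count vals "bking" : Int) ≠ 1 then false
    else if (PySem.List.count vals "wpawn" : Int) > MAX_PAWNS ∨ (PySem.List.count vals "bpawn" : Int) > MAX_PAWNS then false
    else
      -- sum(1 for v in vals if v[0] == 'w'): the 0/1-sum is countP (PYSEM sum_map_ite_one_zero);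
      -- v[0] is exact here: every value passed the piece-name subset check, so is nonempty
      let whites : Int := (vals.countP (fun v => PySem.Str.pyGet? v 0 == some 'w') : Int)
      if whites > MAX_PIECES ∨ (vals.length : Int) - whites > MAX_PIECES then false
      else true

-- ===== PRECONDITION & SPEC =====
def Spec_is_valid_chessboard (board : List (String × String)) (out : Bool) : Prop := out = is_valid_chessboard_alt board
instance (board : List (String × String)) (out : Bool) : Decidable (Spec_is_valid_chessboard board out) := by unfold Spec_is_valid_chessboard; infer_instance

-- ===== CLAIM (what is proved, stated in full; the proofs are below) =====
def Claim_equal_is_valid_chessboard : Prop := ∀ (board : List (String × String)), Dom_is_valid_chessboard board → Spec_is_valid_chessboard board (is_valid_chessboard board)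

-- ===== LEMMAS AND PROOFS =====

-- the per-key validity check A performs
def chessOkKey (k : String) : Bool :=
  decide (PySem.Str.len k = 2) &&
  (match PySem.Str.pyGet? k 0, PySem.Str.pyGet? k 1 with
   | some c0, some c1 => POSSIBLE_X.contains c0 && POSSIBLE_Y.contains c1
   | _, _ => false)

-- the final threshold check, as a function of the six counted quantities
def chessFinal (wkings bkings wpawns bpawns wpieces bpieces : Int) : Bool :=
  if wkings ≠ 1 ∨ bkings ≠ 1 then false
  else if wpawns > MAX_PAWNS ∨ bpawns > MAX_PAWNS then false
  else if wpieces > MAX_PIECES ∨ bpieces > MAX_PIECES then false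
  else true

theorem chessA_keyloop_eq (ks : List String) : chessA_keyloop ks = ks.all chessOkKey := by
  induction ks with
  | nil => rfl
  | cons k rest ih =>
    simp only [chessA_keyloop, chessOkKey, List.all_cons]
    by_cases h1 : PySem.Str.len k = 2
    · have h1' : (k.length : Int) = 2 := by simpa using h1
      rw [if_neg (by simpa using h1)]
      rcases hg0 : PySem.Str.pyGet? k 0 with _ | c0 <;> rcases hg1 : PySem.Str.pyGet? k 1 with _ | c1 <;>
        simp only [hg0, hg1] at * <;> simp [h1']
      simp [ih, Bool.and_assoc]
    · rw [if_pos (by simpa using h1)]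
      have h1' : ¬ (k.length : Int) = 2 := by simpa using h1
      simp [h1']

theorem chessA_valloop_eq (vs : List String) :
    ∀ wk bk wp bp wpc bpc : Int,
    chessA_valloop vs wk bk wp bp wpc bpc =
      if vs.all (POSSIBLE_PIECES.contains ·) then
        chessFinal (wk + vs.count "wking") (bk + vs.count "bking")
                   (wp + vs.count "wpawn") (bp + vs.count "bpawn")
                   (wpc + vs.countP (fun v => PySem.Str.startswith v "w"))
                   (bpc + vs.countP (fun v => PySem.Str.startswith v "b"))
      else false := by
  induction vs with
  | nil => intro wk bk wp bp wpc bpc; simp [chessA_valloop, chessFinal]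
  | cons v rest ih =>
    intro wk bk wp bp wpc bpc
    simp only [chessA_valloop, List.all_cons, List.count_cons, List.countP_cons]
    by_cases hv : POSSIBLE_PIECES.contains v = true
    · rw [if_neg (by simpa using hv), ih]
      simp only [hv, Bool.true_and]
      by_cases hall : (rest.all fun x => POSSIBLE_PIECES.contains x) = true
      · rw [if_pos hall, if_pos hall]
        have hv' : v ∈ POSSIBLE_PIECES := by simpa using hv
        clear ih
        fin_cases hv' <;> congr 1 <;> simp [List.count_cons, List.countP_cons] <;>
          (try split_ifs with hc) <;>
          first
            | (push_cast; omega)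
            | (exact absurd (by decide) hc)
            | (exfalso; revert hc; decide)
      · rw [if_neg hall, if_neg hall]
    · rw [if_pos hv, if_neg (by simp only [Bool.and_eq_true]; exact fun hh => hv hh.1)]

-- the 72 legal squares, as the raw list B's set is built from
def chessSquaresList : List String := chessB_X.flatMap (fun x => chessB_Y.map (fun y => chessB_cat x y))

-- each valid file letter (resp. rank digit) is the single character of one of B's strings
theorem chess_linkX (c0 : Char) (h : c0 ∈ POSSIBLE_X) : ∃ x ∈ chessB_X, x.toList = [c0] := by
  fin_cases h
  · exact ⟨"a", by decide, by decide⟩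
  · exact ⟨"b", by decide, by decide⟩
  · exact ⟨"c", by decide, by decide⟩
  · exact ⟨"d", by decide, by decide⟩
  · exact ⟨"e", by decide, by decide⟩
  · exact ⟨"f", by decide, by decide⟩
  · exact ⟨"g", by decide, by decide⟩
  · exact ⟨"h", by decide, by decide⟩

theorem chess_linkY (c1 : Char) (h : c1 ∈ POSSIBLE_Y) : ∃ y ∈ chessB_Y, y.toList = [c1] := by
  fin_cases h
  · exact ⟨"0", by decide, by decide⟩
  · exact ⟨"1", by decide, by decide⟩
  · exact ⟨"2", by decide, by decide⟩
  · exact ⟨"3", by decide, by decide⟩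
  · exact ⟨"4", by decide, by decide⟩
  · exact ⟨"5", by decide, by decide⟩
  · exact ⟨"6", by decide, by decide⟩
  · exact ⟨"7", by decide, by decide⟩
  · exact ⟨"8", by decide, by decide⟩

-- and conversely, B's one-char strings carry valid characters
theorem chess_linkX' (x : String) (h : x ∈ chessB_X) : ∃ c0 ∈ POSSIBLE_X, x.toList = [c0] := by
  fin_cases h
  · exact ⟨'a', by decide, by decide⟩
  · exact ⟨'b', by decide, by decide⟩
  · exact ⟨'c', by decide, by decide⟩
  · exact ⟨'d', by decide, by decide⟩
  · exact ⟨'e', by decide, by decide⟩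
  · exact ⟨'f', by decide, by decide⟩
  · exact ⟨'g', by decide, by decide⟩
  · exact ⟨'h', by decide, by decide⟩

theorem chess_linkY' (y : String) (h : y ∈ chessB_Y) : ∃ c1 ∈ POSSIBLE_Y, y.toList = [c1] := by
  fin_cases h
  · exact ⟨'0', by decide, by decide⟩
  · exact ⟨'1', by decide, by decide⟩
  · exact ⟨'2', by decide, by decide⟩
  · exact ⟨'3', by decide, by decide⟩
  · exact ⟨'4', by decide, by decide⟩
  · exact ⟨'5', by decide, by decide⟩
  · exact ⟨'6', by decide, by decide⟩
  · exact ⟨'7', by decide, by decide⟩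
  · exact ⟨'8', by decide, by decide⟩

theorem chessOkKey_iff_mem (k : String) : chessOkKey k = true ↔ k ∈ chessSquaresList := by
  constructor
  · intro h
    unfold chessOkKey at h
    rw [Bool.and_eq_true, decide_eq_true_eq] at h
    obtain ⟨hlen, hrest⟩ := h
    have hlen2 : k.toList.length = 2 := by have := PySem.Str.len_eq k; omega
    obtain ⟨c0, c1, hl⟩ := List.length_eq_two.mp hlen2
    have hg0 : PySem.Str.pyGet? k 0 = some c0 := by
      have := PySem.Str.pyGet?_natCast k 0; rw [hl] at this; exact this
    have hg1 : PySem.Str.pyGet? k 1 = some c1 := by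
      have := PySem.Str.pyGet?_natCast k 1; rw [hl] at this; exact this
    rw [hg0, hg1, Bool.and_eq_true] at hrest
    obtain ⟨x, hx, hxl⟩ := chess_linkX c0 (by simpa using hrest.1)
    obtain ⟨y, hy, hyl⟩ := chess_linkY c1 (by simpa using hrest.2)
    simp only [chessSquaresList, List.mem_flatMap, List.mem_map]
    refine ⟨x, hx, y, hy, ?_⟩
    have hcat : chessB_cat x y = String.ofList [c0, c1] := by
      unfold chessB_cat; rw [hxl, hyl]; rfl
    rw [hcat, ← hl, String.ofList_toList]
  · intro h
    simp only [chessSquaresList, List.mem_flatMap, List.mem_map] at h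
    obtain ⟨x, hx, y, hy, rfl⟩ := h
    obtain ⟨c0, hc0, hxl⟩ := chess_linkX' x hx
    obtain ⟨c1, hc1, hyl⟩ := chess_linkY' y hy
    have htl : (chessB_cat x y).toList = [c0, c1] := by
      unfold chessB_cat; rw [hxl, hyl]; exact String.toList_ofList
    unfold chessOkKey
    rw [Bool.and_eq_true, decide_eq_true_eq]
    refine ⟨by rw [PySem.Str.len_eq, htl]; rfl, ?_⟩
    have hg0 : PySem.Str.pyGet? (chessB_cat x y) 0 = some c0 := by
      have := PySem.Str.pyGet?_natCast (chessB_cat x y) 0; rw [htl] at this; exact this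
    have hg1 : PySem.Str.pyGet? (chessB_cat x y) 1 = some c1 := by
      have := PySem.Str.pyGet?_natCast (chessB_cat x y) 1; rw [htl] at this; exact this
    rw [hg0, hg1, Bool.and_eq_true]
    exact ⟨by simpa using hc0, by simpa using hc1⟩

theorem chess_bool_eq_of_iff (a b : Bool) (h : a = true ↔ b = true) : a = b := by
  cases a <;> cases b <;> simp_all

-- A's key loop answers exactly B's subset question
theorem chess_keys_subset (ks : List String) :
    chessA_keyloop ks = PySem.Set.issubset (PySem.Set.ofList ks) chessB_squares := by
  rw [chessA_keyloop_eq]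
  apply chess_bool_eq_of_iff
  rw [PySem.Set.issubset_iff, List.all_eq_true]
  constructor
  · intro h x hx
    rw [PySem.Set.mem_ofList] at hx
    rw [chessB_squares, PySem.Set.mem_ofList]
    exact (chessOkKey_iff_mem x).mp (h x hx)
  · intro h k hk
    have hm := h k ((PySem.Set.mem_ofList ks k).mpr hk)
    rw [chessB_squares, PySem.Set.mem_ofList] at hm
    exact (chessOkKey_iff_mem k).mpr hm

-- B's value subset question is A's per-value membership test
theorem chess_vals_subset (vs : List String) :
    PySem.Set.issubset (PySem.Set.ofList vs) (PySem.Set.ofList POSSIBLE_PIECES) =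
      vs.all (POSSIBLE_PIECES.contains ·) := by
  apply chess_bool_eq_of_iff
  rw [PySem.Set.issubset_iff, List.all_eq_true]
  constructor
  · intro h v hv
    have hm := h v ((PySem.Set.mem_ofList vs v).mpr hv)
    rw [PySem.Set.mem_ofList] at hm
    simpa using hm
  · intro h x hx
    rw [PySem.Set.mem_ofList] at hx
    rw [PySem.Set.mem_ofList]
    simpa using h x hx

-- on piece names, 'first char is w' is 'startswith w'
theorem chess_countP_w (vs : List String) (h : vs.all (POSSIBLE_PIECES.contains ·) = true) :
    vs.countP (fun v => PySem.Str.pyGet? v 0 == some 'w') =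
      vs.countP (fun v => PySem.Str.startswith v "w") := by
  rw [List.all_eq_true] at h
  apply List.countP_congr
  intro v hv
  have hv' : v ∈ POSSIBLE_PIECES := by simpa using h v hv
  fin_cases hv' <;> simp <;> decide

-- every piece name starts with 'w' or 'b', so the two counts sum to the length
theorem chess_countP_len (vs : List String) (h : vs.all (POSSIBLE_PIECES.contains ·) = true) :
    vs.countP (fun v => PySem.Str.startswith v "w") +
      vs.countP (fun v => PySem.Str.startswith v "b") = vs.length := by
  rw [List.all_eq_true] at h
  rw [List.length_eq_countP_add_countP (l := vs) (fun v => PySem.Str.startswith v "w")]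
  congr 1
  apply List.countP_congr
  intro v hv
  have hv' : v ∈ POSSIBLE_PIECES := by simpa using h v hv
  fin_cases hv' <;> simp <;> decide

-- B's threshold cascade is chessFinal with the black total written as complement
theorem chessB_tail_eq (ck cb pw pb w n : Int) :
    (if ck ≠ 1 ∨ cb ≠ 1 then false
     else if pw > MAX_PAWNS ∨ pb > MAX_PAWNS then false
     else if w > MAX_PIECES ∨ n - w > MAX_PIECES then false
     else true)
      = chessFinal ck cb pw pb w (n - w) := rfl

-- ===== VERDICT (by name: the statement is the Claim_ definition above) =====
theorem is_valid_chessboard_spec : Claim_equal_is_valid_chessboard := by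
  unfold Claim_equal_is_valid_chessboard
  intro board _
  unfold Spec_is_valid_chessboard is_valid_chessboard is_valid_chessboard_alt
  dsimp only
  rw [← chess_keys_subset, chessA_keyloop_eq]
  by_cases hk : (board.map Prod.fst).all chessOkKey = true
  · rw [if_neg (by simp [hk]), if_neg (by simp [hk])]
    rw [chess_vals_subset]
    set vs := board.map Prod.snd with hvs
    by_cases hvall : vs.all (POSSIBLE_PIECES.contains ·) = true
    · rw [if_neg (by rw [hvall]; simp), chessA_valloop_eq, if_pos hvall]
      simp only [PySem.List.count_eq, chess_countP_w vs hvall, zero_add, chessB_tail_eq]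
      have hlen := chess_countP_len vs hvall
      have hb : (vs.length : Int) - (vs.countP (fun v => PySem.Str.startswith v "w") : Int)
          = (vs.countP (fun v => PySem.Str.startswith v "b") : Int) := by
        omega
      rw [hb]
    · have hvf : vs.all (POSSIBLE_PIECES.contains ·) = false := by simpa using hvall
      rw [if_pos (by rw [hvf]; simp), chessA_valloop_eq, if_neg hvall]
  · have hkf : (board.map Prod.fst).all chessOkKey = false := by simpa using hk
    rw [hkf, if_pos rfl, if_pos (by simp)]
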